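-- pv_equiv track=rewrite | github.com/radamedinskaya/Python | Task2/8.py | sameLetterPattern
-- ===== SOURCE A (Python) =====
-- def sameLetterPattern(a, b):
--     if len(a) != len(b): #сразу проверяем по длине строк, возвращает False если строки не совпадают
--         return False
--     x, y = ord(a[0]), ord(b[0]) #функция ord возвращает значение первого элемента из таблицы символов UNICODE(запоминаем первые символы)
--     pos = 1
--     while pos < len(a): #запускаем цикл, в котором будем проходить по символьно
--         dx, dy = x - ord(a[pos]), y - ord(b[pos]) #запоминаем разницу между первым и вторым элементов
--         if dx != dy: #если разница отличается возвращает False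
--             return False
--         x, y = ord(a[pos]), ord(b[pos]) #Если разница равна, переходим к следующему элементу
--         pos += 1
--     return True #возвращает True если соответстует шаблону
-- ===== SOURCE B (Python) =====
-- def sameLetterPattern(a, b):
--     if len(a) != len(b):
--         return False
--     d0 = ord(a[0]) - ord(b[0])
--     return all(ord(x) - ord(y) == d0 for x, y in zip(a, b))
-- ===== Notes on version B (the rewrite author's own statement) =====
-- stated objective: simpler
-- what changed: B replaces A's while-loop that rolls the previous character pair (x,y) through the string with a single fixed offset d0 = ord(a[0]) - ord(b[0]) checked against every zipped character pair via all(); no mutable loop state remains.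
import Mathlib
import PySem

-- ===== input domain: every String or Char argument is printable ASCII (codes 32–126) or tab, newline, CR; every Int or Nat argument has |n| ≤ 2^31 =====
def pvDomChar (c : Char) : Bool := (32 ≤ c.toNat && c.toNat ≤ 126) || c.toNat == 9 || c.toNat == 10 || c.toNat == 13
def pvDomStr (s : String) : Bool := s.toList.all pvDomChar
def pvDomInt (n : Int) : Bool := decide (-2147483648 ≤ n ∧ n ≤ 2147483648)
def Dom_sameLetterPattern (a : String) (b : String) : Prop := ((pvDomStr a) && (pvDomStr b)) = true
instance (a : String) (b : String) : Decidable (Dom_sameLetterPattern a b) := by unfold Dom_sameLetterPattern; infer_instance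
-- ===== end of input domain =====

-- B replaces A's while-loop carrying the previous character pair with one fixed offset
-- d0 = ord(a[0]) - ord(b[0]) checked against every zipped pair (objective: simpler).

-- ===== PORT A =====
-- A's while-loop: state x, y (codes of the previous characters) and pos; fuel is len - pos.
def pvLoopA (la lb : List Char) (x y : Int) (pos : Nat) : Bool :=
  if _h : pos < la.length then
    let ax : Int := ((la[pos]?).getD ' ').toNat   -- in-range under equal lengths (Pre_)
    let bx : Int := ((lb[pos]?).getD ' ').toNat
    let dx := x - ax
    let dy := y - bx
    if dx ≠ dy then false
    else pvLoopA la lb ax bx (pos + 1)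
  else true
termination_by la.length - pos

def sameLetterPattern (a : String) (b : String) : Bool :=
  if a.toList.length ≠ b.toList.length then false
  else
    match PySem.Str.pyGet? a 0, PySem.Str.pyGet? b 0 with
    | some ca, some cb => pvLoopA a.toList b.toList (ca.toNat) (cb.toNat) 1
    | _, _ => false   -- IndexError on a[0]/b[0]: excluded by Pre_

-- ===== PORT B =====
def sameLetterPattern_alt (a : String) (b : String) : Bool :=
  if a.toList.length ≠ b.toList.length then false
  else
    -- d0 = ord(a[0]) - ord(b[0]); none = IndexError on a[0]/b[0], excluded by Pre_
    match (PySem.Str.pyGet? a 0).bind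
            (fun ca => (PySem.Str.pyGet? b 0).map
              (fun cb => (ca.toNat : Int) - (cb.toNat : Int))) with
    | some d0 => (a.toList.zip b.toList).all
        (fun p => ((p.1.toNat : Int) - (p.2.toNat : Int)) == d0)
    | none => false

-- ===== PRECONDITION & SPEC =====
-- Pre_ excludes only the pair of two empty strings, on which both A and B raise IndexError at a[0].
def Pre_sameLetterPattern (a : String) (b : String) : Prop := ¬ (a = "" ∧ b = "")
instance (a : String) (b : String) : Decidable (Pre_sameLetterPattern a b) := by
  unfold Pre_sameLetterPattern; infer_instance
def pvWitness_sameLetterPattern : String × String := ("abc", "bcd")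
def Spec_sameLetterPattern (a : String) (b : String) (out : Bool) : Prop := out = sameLetterPattern_alt a b
instance (a : String) (b : String) (out : Bool) : Decidable (Spec_sameLetterPattern a b out) := by
  unfold Spec_sameLetterPattern; infer_instance

-- ===== CLAIM (what is proved, stated in full; the proofs are below) =====
def Claim_equal_sameLetterPattern : Prop := ∀ (a : String) (b : String), Dom_sameLetterPattern a b → Pre_sameLetterPattern a b → Spec_sameLetterPattern a b (sameLetterPattern a b)

-- ===== LEMMAS AND PROOFS =====

-- A's loop from position pos equals the constant-offset check (against x - y) on the zipped tails.
lemma pvLoopA_eq_all (la lb : List Char) (hlen : la.length = lb.length) :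
    ∀ (pos : Nat) (x y : Int),
      pvLoopA la lb x y pos
        = ((la.drop pos).zip (lb.drop pos)).all
            (fun p => ((p.1.toNat : Int) - (p.2.toNat : Int)) == x - y) := by
  intro pos
  induction' hfuel : la.length - pos using Nat.strong_induction_on with n ih generalizing pos
  intro x y
  rw [pvLoopA]
  by_cases h : pos < la.length
  · have hb : pos < lb.length := hlen ▸ h
    rw [List.drop_eq_getElem_cons h, List.drop_eq_getElem_cons hb]
    simp only [h, dif_pos, List.getElem?_eq_getElem h, List.getElem?_eq_getElem hb,
      Option.getD_some, List.zip_cons_cons, List.all_cons]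
    by_cases hd : x - ((la[pos].toNat : Int)) ≠ y - ((lb[pos].toNat : Int))
    · have : ¬ (((la[pos].toNat : Int) - (lb[pos].toNat : Int)) == x - y) = true := by
        simp only [beq_iff_eq]; omega
      simp [hd, this]
    · push_neg at hd
      have heq : (((la[pos].toNat : Int) - (lb[pos].toNat : Int)) == x - y) = true := by
        simp only [beq_iff_eq]; omega
      have hrec := ih (la.length - (pos + 1)) (by omega) (pos + 1) rfl
        ((la[pos].toNat : Int)) ((lb[pos].toNat : Int))
      have hxy : (la[pos].toNat : Int) - (lb[pos].toNat : Int) = x - y := by omega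
      simp only [hd, ne_eq, not_true_eq_false, if_false, hrec, hxy]
      simp
  · simp only [h, dif_neg, not_false_eq_true]
    rw [List.drop_eq_nil_of_le (by omega), List.zip_nil_left, List.all_nil]

-- ===== VERDICT (by name: the statement is the Claim_ definition above) =====
theorem sameLetterPattern_spec : Claim_equal_sameLetterPattern := by
  intro a b _hdom hpre
  unfold Spec_sameLetterPattern sameLetterPattern sameLetterPattern_alt
  by_cases hlen : a.toList.length ≠ b.toList.length
  · have h' : ¬ a.length = b.length := by simpa using hlen
    simp [h']
  · push_neg at hlen
    simp only [hlen, ne_eq, not_true_eq_false, if_false]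
    cases hga : PySem.Str.pyGet? a 0 with
    | none => simp
    | some ca =>
      cases hgb : PySem.Str.pyGet? b 0 with
      | none => simp
      | some cb =>
        -- a[0] = some ca forces a nonempty list with head ca; same for b
        have ha0 : a.toList[0]? = some ca := by
          by_cases hp : 0 < a.length
          · simpa [PySem.Str.pyGet?, PySem.List.pyGet?, PySem.List.pyIdx?, hp] using hga
          · simp [PySem.Str.pyGet?, PySem.List.pyGet?, PySem.List.pyIdx?, hp] at hga
        have hb0 : b.toList[0]? = some cb := by
          by_cases hp : 0 < b.length
          · simpa [PySem.Str.pyGet?, PySem.List.pyGet?, PySem.List.pyIdx?, hp] using hgb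
          · simp [PySem.Str.pyGet?, PySem.List.pyGet?, PySem.List.pyIdx?, hp] at hgb
        obtain ⟨la', hla⟩ : ∃ t, a.toList = ca :: t := by
          cases hal : a.toList with
          | nil => rw [hal] at ha0; simp at ha0
          | cons h t => rw [hal] at ha0; simp at ha0; exact ⟨t, by rw [ha0]⟩
        obtain ⟨lb', hlb⟩ : ∃ t, b.toList = cb :: t := by
          cases hbl : b.toList with
          | nil => rw [hbl] at hb0; simp at hb0
          | cons h t => rw [hbl] at hb0; simp at hb0; exact ⟨t, by rw [hb0]⟩
        dsimp only
        rw [pvLoopA_eq_all a.toList b.toList hlen 1 (ca.toNat) (cb.toNat)]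
        rw [hla, hlb]
        simp [List.all_cons]
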